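-- pv_equiv track=rewrite | github.com/pritam1322/-6Companies30days | Adobe/New library version.py | solve
-- ===== SOURCE A (Python) =====
-- def solve(s1,s2):
--     i = 0
--     j = 0
--
--     while i < len(s1) and j < len(s2):
--
--         if s1[i] > s2[j]:
--             return s1
--
--         elif s1[i] < s2[j] :
--             return s2
--
--         i += 1
--         j += 1
-- ===== SOURCE B (Python) =====
-- def solve(s1, s2):
--     m = min(len(s1), len(s2))
--     p1 = s1[:m]
--     p2 = s2[:m]
--     if p1 == p2:
--         return None
--     return s1 if p1 > p2 else s2
-- ===== Notes on version B (the rewrite author's own statement) =====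
-- stated objective: simpler
-- what changed: Replaces the explicit index-by-index while loop with slicing both strings to their common length and a single built-in comparison of the equal-length prefixes (returning None when the prefixes are equal, matching A's implicit fall-through); the C-implemented slice/compare removes the per-character interpreter loop.
import Mathlib
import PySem

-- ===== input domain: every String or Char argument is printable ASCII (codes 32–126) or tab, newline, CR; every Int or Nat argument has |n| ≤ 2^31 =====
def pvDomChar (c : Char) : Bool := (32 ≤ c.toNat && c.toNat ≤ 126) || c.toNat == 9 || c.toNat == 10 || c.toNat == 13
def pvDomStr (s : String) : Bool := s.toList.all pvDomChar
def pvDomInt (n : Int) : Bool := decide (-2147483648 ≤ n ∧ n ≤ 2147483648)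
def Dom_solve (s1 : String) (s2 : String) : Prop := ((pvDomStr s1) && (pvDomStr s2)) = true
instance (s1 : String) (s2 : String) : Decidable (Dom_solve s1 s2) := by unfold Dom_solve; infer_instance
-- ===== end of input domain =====

-- B replaces A's index-by-index while loop by slicing both strings to their common
-- length and one built-in comparison of the equal-length prefixes (objective: simpler).

-- ===== PORT A =====
-- A's while loop: advance i, j in lockstep over both strings; at the first position
-- where the characters differ return the string with the larger character; if the
-- loop ends without a difference, fall through (Python returns None).
def solveLoop (s1 s2 : String) : List Char → List Char → Option String
  | a :: as, b :: bs =>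
      if a > b then some s1
      else if a < b then some s2
      else solveLoop s1 s2 as bs
  | _, _ => none

def solve (s1 : String) (s2 : String) : Option String :=
  solveLoop s1 s2 s1.toList s2.toList

-- ===== PORT B =====
-- Port of Python's built-in '>' on two equal-length strings (Source B's `p1 > p2`).
def gtChars : List Char → List Char → Bool
  | a :: as, b :: bs =>
      if a > b then true
      else if a < b then false
      else gtChars as bs
  | _ :: _, [] => true
  | _, _ => false

def solve_alt (s1 : String) (s2 : String) : Option String :=
  let m := min s1.length s2.length
  let p1 := s1.toList.take m
  let p2 := s2.toList.take m
  if p1 = p2 then none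
  else if gtChars p1 p2 then some s1 else some s2

-- ===== PRECONDITION & SPEC =====
def Spec_solve (s1 : String) (s2 : String) (out : Option String) : Prop := out = solve_alt s1 s2
instance (s1 : String) (s2 : String) (out : Option String) : Decidable (Spec_solve s1 s2 out) := by unfold Spec_solve; infer_instance

-- ===== CLAIM (what is proved, stated in full; the proofs are below) =====
def Claim_equal_solve : Prop := ∀ (s1 : String) (s2 : String), Dom_solve s1 s2 → Spec_solve s1 s2 (solve s1 s2)

-- ===== LEMMAS AND PROOFS =====
theorem solveLoop_eq (s1 s2 : String) :
    ∀ (as bs : List Char),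
      solveLoop s1 s2 as bs =
        (let m := min as.length bs.length
         let p1 := as.take m
         let p2 := bs.take m
         if p1 = p2 then none else if gtChars p1 p2 then some s1 else some s2)
  | [], bs => by simp [solveLoop]
  | a :: as, [] => by simp [solveLoop]
  | a :: as, b :: bs => by
      have ih := solveLoop_eq s1 s2 as bs
      simp only [solveLoop, List.length_cons]
      have hmin : min (as.length + 1) (bs.length + 1) = min as.length bs.length + 1 := by omega
      simp only [hmin]
      by_cases h1 : a > b
      · have hne : a ≠ b := ne_of_gt h1
        simp [h1, List.take_succ_cons, hne, gtChars]
      · by_cases h2 : a < b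
        · have hne : a ≠ b := ne_of_lt h2
          simp [h1, h2, List.take_succ_cons, hne, gtChars]
        · have heq : a = b := le_antisymm (not_lt.mp h1) (not_lt.mp h2)
          subst heq
          simp [List.take_succ_cons, gtChars, ih]

-- ===== VERDICT (by name: the statement is the Claim_ definition above) =====
theorem solve_spec : Claim_equal_solve := by
  intro s1 s2 _
  unfold Spec_solve solve solve_alt
  rw [solveLoop_eq]
  simp only [String.length_toList]
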